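-- pv_equiv track=rewrite | github.com/fanurs/data-analysis-e15190-e14030 | e15190/utilities/atomic_mass_evaluation.py | auto_column_splitter
-- ===== SOURCE A (Python) =====
-- def auto_column_splitter(content):
--     """This function automatically separates the columns of an ASCII table.
--
--     This function can separate the columns of `.txt` tables that use space
--     characters as their delimiters.
--
--     Parameters
--     ----------
--     content : list of str
--         A list of strings that correspond to the content of the ASCII table.
--         Each element in the list, which is a string, corresponds to each row
--         of the table. These strings can be either ended with the newline
--         character or not. The row of column names or headers should not be
--         included.
--
--     Returns
--     -------
--     splitted_content : 2D list of str
--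
--     Examples
--     --------
--     >>> from e15190.utilities import atomic_mass_evaluation as ame
--     >>> dm = ame.DataManager()
--     >>> content = ['Amy  168.5cm', 'Bob  181.9cm', 'Cici 157.3cm']
--     >>> dm.auto_column_splitter(content)
--     [['Amy  ', '168.5cm'], ['Bob  ', '181.9cm'], ['Cici ', '157.3cm']]
--     """
--     min_line_length = min([len(line) for line in content])
--     split_pos = []
--     for c in range(1, min_line_length):
--         is_col_splitter = True
--         is_all_space = True
--         for line in content:
--             if line[c] != ' ':
--                 is_all_space = False
--             if line[c] != ' ' and line[c-1] != ' ':
--                 is_col_splitter = False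
--             if not is_all_space and not is_col_splitter:
--                 break
--         if is_col_splitter and not is_all_space:
--             split_pos.append(c)
--
--     splitted_content = []
--     split_pos = [0] + split_pos
--     for line in content:
--         line = line.strip('\n')
--         splitted_line = []
--         for c0, c1 in zip(split_pos[:-1], split_pos[1:]):
--             splitted_line.append(line[c0:c1])
--         splitted_line.append(line[c1:])
--         splitted_content.append(splitted_line)
--
--     return splitted_content
-- ===== SOURCE B (Python) =====
-- def auto_column_splitter(content):
--     """Line-major re-implementation: one pass over the rows accumulates, per
--     column, a 'some row is non-space here' flag and a 'some row is non-space
--     here and at the previous column' flag; split positions then fall out of a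
--     single comprehension, and each row is sliced as first/middle/last pieces.
--     (A scans column-by-column with a two-flag inner loop and early break.)"""
--     m = min(len(line) for line in content)
--     nonspace = [False] * (m - 1)
--     conflict = [False] * (m - 1)
--     for line in content:
--         row = [ch != ' ' for ch in line[:m]]
--         nonspace = [a or b for a, b in zip(nonspace, row[1:])]
--         conflict = [a or (b and p) for a, (b, p) in zip(conflict, zip(row[1:], row))]
--     cuts = [c + 1 for c, (n, f) in enumerate(zip(nonspace, conflict)) if n and not f]
--     result = []
--     for line in content:
--         line = line.strip('\n')
--         result.append([line[:cuts[0]]]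
--                       + [line[a:b] for a, b in zip(cuts, cuts[1:])]
--                       + [line[cuts[-1]:]])
--     return result
-- ===== Notes on version B (the rewrite author's own statement) =====
-- stated objective: alternative
-- what changed: Split-position detection is restructured from A's column-major double loop with two flags and an early break into a single line-major pass that accumulates per-column non-space and adjacent-non-space boolean rows with zips; split positions and the first/middle/last row slices then fall out of comprehensions.
import Mathlib
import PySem

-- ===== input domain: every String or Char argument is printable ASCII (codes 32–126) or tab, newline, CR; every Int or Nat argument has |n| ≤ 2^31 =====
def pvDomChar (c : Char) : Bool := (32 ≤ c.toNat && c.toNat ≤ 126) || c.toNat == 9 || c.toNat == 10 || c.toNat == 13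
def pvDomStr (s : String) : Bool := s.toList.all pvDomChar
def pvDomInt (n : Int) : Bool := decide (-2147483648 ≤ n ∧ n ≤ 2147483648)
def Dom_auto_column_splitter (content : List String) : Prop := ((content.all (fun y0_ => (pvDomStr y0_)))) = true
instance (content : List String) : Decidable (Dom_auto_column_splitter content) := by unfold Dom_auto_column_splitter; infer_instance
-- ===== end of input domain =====

-- B restructures split-position detection into one line-major pass accumulating per-column
-- boolean rows and slices each row as first/middle/last pieces; same return value as A
-- wherever A returns (Pre_); neither version mutates its argument.

-- ===== PORT A =====
-- inner row loop of A's detection: state (is_all_space, is_col_splitter), early `break` kept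
def pvAScan : List String → Int → Bool → Bool → Bool × Bool
  | [], _, as_, cs_ => (as_, cs_)
  | line :: rest, c, as_, cs_ =>
    let as' := if (PySem.List.pyGetD line.toList c ' ') != ' ' then false else as_
    let cs' := if ((PySem.List.pyGetD line.toList c ' ') != ' ') &&
                  ((PySem.List.pyGetD line.toList (c-1) ' ') != ' ') then false else cs_
    if !as' && !cs' then (as', cs') else pvAScan rest c as' cs'

def auto_column_splitter (content : List String) : List (List String) :=
  let m : Int := (PySem.List.min? (content.map PySem.Str.len) id).getD 0
  let split_pos : List Int :=
    (PySem.List.pyRange 1 m).foldl (fun acc c =>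
      let r := pvAScan content c true true
      if r.2 && !r.1 then acc ++ [c] else acc) []
  let sp : List Int := 0 :: split_pos
  -- Python's trailing line[c1:] reuses c1 left by the zip loop = last of sp when the zip ran;
  -- when it never ran Python raises UnboundLocalError (outside Pre_), here pyGetD's default
  content.foldl (fun out line =>
    let l := PySem.Chars.stripChars line.toList ['\n']
    let pairs := (PySem.List.slice sp none (some (-1))).zip (PySem.List.slice sp (some 1) none)
    let sl := pairs.foldl (fun acc p => acc ++ [String.ofList (PySem.List.slice l (some p.1) (some p.2))]) []
    out ++ [sl ++ [String.ofList (PySem.List.slice l (some (PySem.List.pyGetD sp (-1) 0)) none)]]) []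

-- ===== PORT B =====
-- one line of B's accumulation pass: or-in this line's non-space row and adjacent-pair row
def pvBStep (m : Int) (st : List Bool × List Bool) (line : String) : List Bool × List Bool :=
  let row := (PySem.List.slice line.toList none (some m)).map (fun ch => ch != ' ')
  ((st.1.zip (PySem.List.slice row (some 1) none)).map (fun p => p.1 || p.2),
   (st.2.zip ((PySem.List.slice row (some 1) none).zip row)).map (fun p => p.1 || (p.2.1 && p.2.2)))

def auto_column_splitter_alt (content : List String) : List (List String) :=
  let m : Int := (PySem.List.min? (content.map PySem.Str.len) id).getD 0
  let st := content.foldl (pvBStep m) (List.replicate (m-1).toNat false, List.replicate (m-1).toNat false)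
  let cuts : List Int := (PySem.List.enumerate (st.1.zip st.2)).foldl
      (fun acc p => if p.2.1 && !p.2.2 then acc ++ [p.1 + 1] else acc) []
  -- Python's cuts[0] / cuts[-1] raise IndexError when no split column exists (outside Pre_);
  -- here pyGetD's default stands in for the missing value
  content.foldl (fun out line =>
    let l := PySem.Chars.stripChars line.toList ['\n']
    out ++ [[String.ofList (PySem.List.slice l none (some (PySem.List.pyGetD cuts 0 0)))]
      ++ (cuts.zip (PySem.List.slice cuts (some 1) none)).map
          (fun p => String.ofList (PySem.List.slice l (some p.1) (some p.2)))
      ++ [String.ofList (PySem.List.slice l (some (PySem.List.pyGetD cuts (-1) 0)) none)]]) []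

-- ===== PRECONDITION & SPEC =====
-- a column c that A's detection accepts: in range of every line, some line non-space at c,
-- and no line non-space at both c and c-1
def pvColOK (content : List String) (c : Nat) : Prop :=
  1 ≤ c ∧ (∀ l ∈ content, c < l.toList.length) ∧
  (∃ l ∈ content, l.toList.getD c ' ' ≠ ' ') ∧
  (∀ l ∈ content, ¬(l.toList.getD c ' ' ≠ ' ' ∧ l.toList.getD (c-1) ' ' ≠ ' '))

-- Pre_ excludes exactly the inputs where Python A raises: the empty table (ValueError from min)
-- and tables with no accepted split column (UnboundLocalError on c1)
def Pre_auto_column_splitter (content : List String) : Prop :=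
  content ≠ [] ∧ ∃ c ∈ List.range ((content.headD "").toList.length), pvColOK content c
instance (content : List String) : Decidable (Pre_auto_column_splitter content) := by
  unfold Pre_auto_column_splitter pvColOK; infer_instance

def pvWitness_auto_column_splitter : List String := ["a b", "c d"]

def Spec_auto_column_splitter (content : List String) (out : List (List String)) : Prop :=
  out = auto_column_splitter_alt content
instance (content : List String) (out : List (List String)) : Decidable (Spec_auto_column_splitter content out) := by
  unfold Spec_auto_column_splitter; infer_instance

-- ===== CLAIM =====
def Claim_equal_auto_column_splitter : Prop := ∀ (content : List String),
  Dom_auto_column_splitter content → Pre_auto_column_splitter content →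
  Spec_auto_column_splitter content (auto_column_splitter content)

-- ===== LEMMAS AND PROOFS =====

-- proof-side abbreviations
def pvNs (l : String) (c : Nat) : Bool := l.toList.getD c ' ' != ' '

def pvGood (content : List String) (c : Nat) : Bool :=
  (content.any fun l => pvNs l c) && !(content.any fun l => pvNs l c && pvNs l (c-1))

def pvM (content : List String) : Int :=
  (PySem.List.min? (content.map PySem.Str.len) id).getD 0

def pvPos (content : List String) : List Int :=
  ((List.range ((pvM content - 1).toNat)).filter (fun k => pvGood content (k+1))).map
    (fun (k : Nat) => (k:Int)+1)

def pvCanon (content : List String) (pos : List Int) : List (List String) :=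
  content.map (fun line =>
    ((0 :: pos).zip (0 :: pos).tail).map (fun p =>
        String.ofList (PySem.List.slice (PySem.Chars.stripChars line.toList ['\n'])
          (some p.1) (some p.2)))
      ++ [String.ofList (PySem.List.slice (PySem.Chars.stripChars line.toList ['\n'])
            (some (PySem.List.pyGetD (0 :: pos) (-1) 0)) none)])

-- generic list facts specific to the shapes used here
theorem pv_zip_dropLast_tail {α : Type} (xs : List α) :
    xs.dropLast.zip xs.tail = xs.zip xs.tail := by
  induction xs with
  | nil => simp
  | cons a t ih => cases t <;> simp_all

theorem pv_tail_map_range {α : Type} (q : Nat → α) (M : Nat) :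
    ((List.range M).map q).tail = (List.range (M-1)).map (fun k => q (k+1)) := by
  apply List.ext_getElem
  · simp
  · intro i h1 h2
    simp [List.getElem_tail]

theorem pv_zip_map_range {α β : Type} (f : Nat → α) (g : Nat → β) (k n : Nat) :
    ((List.range k).map f).zip ((List.range n).map g)
      = (List.range (min k n)).map (fun i => (f i, g i)) := by
  apply List.ext_getElem
  · simp
  · intro i h1 h2
    simp [List.getElem_zip]

theorem pv_enum_map_range {α : Type} (q : Nat → α) (N : Nat) :
    PySem.List.enumerate ((List.range N).map q)
      = (List.range N).map (fun (k : Nat) => ((k:Int), q k)) := by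
  rw [PySem.List.enumerate_eq_zipIdx_map, List.zipIdx_map]
  have hz : (List.range N).zipIdx = (List.range N).map (fun i => (i,i)) := by
    apply List.ext_getElem
    · simp
    · intro i h1 h2; simp
  rw [hz]
  simp

theorem pv_pyRange_add (N : Nat) (a : Int) :
    PySem.List.pyRange a (a + N) = (List.range N).map (fun (k : Nat) => a + (k : Int)) := by
  induction N with
  | zero => simp [PySem.List.pyRange]
  | succ n ih =>
      have h1 : a + ((n:Int) + 1) = (a + n) + 1 := by ring
      have h2 : a ≤ a + (n:Int) := by omega
      push_cast
      rw [h1, PySem.List.pyRange_one_succ_right h2, ih, List.range_succ]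
      simp

theorem pv_pyRange_one (m : Int) :
    PySem.List.pyRange 1 m = (List.range ((m-1).toNat)).map (fun (k : Nat) => (k:Int)+1) := by
  by_cases h : m ≤ 1
  · have h0 : (m - 1).toNat = 0 := by omega
    rw [h0]
    simp only [List.range_zero, List.map_nil]
    have hc : ¬ (1:Int) < m := by omega
    simp [PySem.List.pyRange, hc]
  · set N := (m-1).toNat with hN
    have hm : m = 1 + (N : Int) := by omega
    rw [hm, pv_pyRange_add]
    apply List.map_congr_left
    intro k _
    omega

-- characterization of A's inner row scan (break kept): final flags are the two all-quantifiers
theorem pv_scanA_eq (c : Int) (lines : List String) : ∀ (as_ cs_ : Bool),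
    pvAScan lines c as_ cs_
      = (as_ && lines.all (fun l => !((PySem.List.pyGetD l.toList c ' ') != ' ')),
         cs_ && lines.all (fun l => !(((PySem.List.pyGetD l.toList c ' ') != ' ')
                  && ((PySem.List.pyGetD l.toList (c-1) ' ') != ' ')))) := by
  induction lines with
  | nil => intro as_ cs_; simp [pvAScan]
  | cons line rest ih =>
      intro as_ cs_
      simp only [pvAScan, List.all_cons]
      cases hb1 : (PySem.List.pyGetD line.toList c ' ' != ' ') <;>
      cases hb2 : (PySem.List.pyGetD line.toList (c-1) ' ' != ' ') <;>
      cases as_ <;> cases cs_ <;>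
      simp [ih]

-- the split positions A computes are pvPos
theorem pv_posA (content : List String) :
    (PySem.List.pyRange 1 (pvM content)).foldl (fun acc c =>
        if (pvAScan content c true true).2 && !(pvAScan content c true true).1
        then acc ++ [c] else acc) []
      = pvPos content := by
  rw [PySem.List.foldl_append_if
        (fun c => (pvAScan content c true true).2 && !(pvAScan content c true true).1)
        (fun c => c), List.nil_append, List.map_id', pv_pyRange_one, List.filter_map]
  unfold pvPos
  apply congrArg
  apply List.filter_congr
  intro k _
  have e1 : ((k:Int)+1) = ((k+1:Nat):Int) := by push_cast; ring
  show ((pvAScan content ((k:Int)+1) true true).2 && !(pvAScan content ((k:Int)+1) true true).1)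
        = pvGood content (k+1)
  rw [e1, pv_scanA_eq]
  have e2 : ((k+1:Nat):Int) - 1 = ((k:Nat):Int) := by push_cast; ring
  rw [e2]
  simp only [pvGood, pvNs, Bool.true_and, PySem.List.pyGetD_natCast, Nat.add_sub_cancel,
    List.any_eq_not_all_not]
  simp [Bool.and_comm]

-- B's row of a line, as a function of column index
theorem pv_rowEq (m : Int) (hm : 0 ≤ m) (l : String) (hl : m ≤ (l.toList.length : Int)) :
    (PySem.List.slice l.toList none (some m)).map (fun ch => ch != ' ')
      = (List.range m.toNat).map (fun j => pvNs l j) := by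
  rw [PySem.List.slice_to _ hm]
  apply List.ext_getElem
  · simp only [List.length_take, List.length_map, List.length_range]
    omega
  · intro i h1 h2
    have hi : i < l.toList.length := by
      simp at h2; omega
    simp [pvNs, List.getD_eq_getElem?_getD, List.getElem?_eq_getElem hi]

-- one line of B's accumulation pass
theorem pv_stepB (m : Int) (hm : 0 ≤ m) (line : String) (hl : m ≤ (line.toList.length : Int))
    (f g : Nat → Bool) :
    pvBStep m ((List.range (m.toNat - 1)).map f, (List.range (m.toNat - 1)).map g) line
      = ((List.range (m.toNat - 1)).map (fun k => f k || pvNs line (k+1)),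
         (List.range (m.toNat - 1)).map (fun k => g k || (pvNs line (k+1) && pvNs line k))) := by
  unfold pvBStep
  simp only [pv_rowEq m hm line hl, PySem.List.slice_from_one, pv_tail_map_range]
  have hmin : min (m.toNat - 1) m.toNat = m.toNat - 1 := by omega
  simp only [Prod.mk.injEq]
  constructor
  · rw [List.zip_map', List.map_map]
    rfl
  · rw [pv_zip_map_range, hmin, List.zip_map', List.map_map]
    rfl

theorem pv_foldB (m : Int) (hm : 0 ≤ m) (lines : List String)
    (hl : ∀ l ∈ lines, m ≤ (l.toList.length : Int)) :
    ∀ (f g : Nat → Bool),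
    lines.foldl (pvBStep m)
        ((List.range (m.toNat - 1)).map f, (List.range (m.toNat - 1)).map g)
      = ((List.range (m.toNat - 1)).map (fun k => f k || lines.any (fun l => pvNs l (k+1))),
         (List.range (m.toNat - 1)).map (fun k => g k || lines.any (fun l => pvNs l (k+1) && pvNs l k))) := by
  induction lines with
  | nil => intro f g; simp
  | cons line rest ih =>
      intro f g
      rw [List.foldl_cons, pv_stepB m hm line (hl line (by simp)) f g,
          ih (fun l hm' => hl l (by simp [hm']))]
      simp only [Prod.mk.injEq]
      constructor <;>
        (apply List.map_congr_left; intro k _; simp [List.any_cons, Bool.or_assoc])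

-- facts about the minimum line length
theorem pv_M_facts (content : List String) (hne : content ≠ []) :
    0 ≤ pvM content ∧ (∀ l ∈ content, pvM content ≤ (l.toList.length : Int)) ∧
      ∃ l0 ∈ content, pvM content = (l0.toList.length : Int) := by
  unfold pvM
  cases hmin : PySem.List.min? (content.map PySem.Str.len) id with
  | none =>
      rw [PySem.List.min?_eq_none_iff] at hmin
      simp at hmin
      exact absurd hmin hne
  | some mv =>
      have hmem := PySem.List.min?_mem hmin
      have hisMin := PySem.List.min?_isMin hmin
      simp only [List.mem_map] at hmem
      obtain ⟨l0, hl0mem, hl0⟩ := hmem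
      refine ⟨by simp [← hl0, PySem.Str.len_eq], fun l hl => ?_, l0, hl0mem, ?_⟩
      · have := hisMin (PySem.Str.len l) (List.mem_map_of_mem hl)
        simpa [PySem.Str.len_eq] using this
      · simp [← hl0, PySem.Str.len_eq]

-- the split positions B computes are pvPos as well
theorem pv_posB (content : List String) (hne : content ≠ []) :
    (PySem.List.enumerate
        ((content.foldl (pvBStep (pvM content))
            (List.replicate ((pvM content - 1).toNat) false,
             List.replicate ((pvM content - 1).toNat) false)).1.zip
          (content.foldl (pvBStep (pvM content))
            (List.replicate ((pvM content - 1).toNat) false,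
             List.replicate ((pvM content - 1).toNat) false)).2)).foldl
      (fun acc p => if p.2.1 && !p.2.2 then acc ++ [p.1 + 1] else acc) []
      = pvPos content := by
  obtain ⟨hm, hl, -⟩ := pv_M_facts content hne
  have hN : (pvM content - 1).toNat = (pvM content).toNat - 1 := by omega
  have hrep : List.replicate ((pvM content).toNat - 1) false
      = (List.range ((pvM content).toNat - 1)).map (fun _ => false) := by
    rw [List.map_const', List.length_range]
  rw [hN, hrep, pv_foldB (pvM content) hm content hl]
  rw [List.zip_map', pv_enum_map_range]
  simp only [PySem.List.foldl_append_if, List.nil_append, List.filter_map, List.map_map]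
  unfold pvPos
  rw [hN]
  have hfilt : ∀ k ∈ List.range ((pvM content).toNat - 1),
      ((fun (p : Int × (Bool × Bool)) => p.2.1 && !p.2.2) ∘
        (fun (k : Nat) => ((k:Int), (false || content.any fun l => pvNs l (k+1),
          false || content.any fun l => pvNs l (k+1) && pvNs l k)))) k
        = pvGood content (k+1) := by
    intro k _
    simp [pvGood]
  rw [List.filter_congr hfilt]
  rfl

theorem pv_A_canon (content : List String) :
    auto_column_splitter content = pvCanon content (pvPos content) := by
  simp only [auto_column_splitter]
  rw [show (PySem.List.min? (content.map PySem.Str.len) id).getD 0 = pvM content from rfl,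
      pv_posA]
  simp only [PySem.List.foldl_append_singleton_eq_map, List.nil_append,
    PySem.List.slice_to_neg_one, PySem.List.slice_from_one, pv_zip_dropLast_tail]
  rfl

theorem pv_last_cons (pos : List Int) (h : pos ≠ []) :
    PySem.List.pyGetD ((0:Int) :: pos) (-1) 0 = PySem.List.pyGetD pos (-1) 0 := by
  rw [PySem.List.pyGetD_neg_one ((0:Int) :: pos) 0 (by simp),
      PySem.List.pyGetD_neg_one pos 0 h, List.getLast_cons h]

theorem pv_B_canon (content : List String) (hne : content ≠ [])
    (hpos : pvPos content ≠ []) :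
    auto_column_splitter_alt content = pvCanon content (pvPos content) := by
  simp only [auto_column_splitter_alt]
  rw [show (PySem.List.min? (content.map PySem.Str.len) id).getD 0 = pvM content from rfl,
      pv_posB content hne]
  obtain ⟨c, rest, hcr⟩ := List.exists_cons_of_ne_nil hpos
  rw [hcr]
  simp only [PySem.List.foldl_append_singleton_eq_map, List.nil_append,
    PySem.List.slice_from_one]
  unfold pvCanon
  apply List.map_congr_left
  intro line _
  rw [pv_last_cons (c :: rest) (by simp)]
  simp [PySem.List.pyGetD_zero_cons]

theorem pv_pos_ne_nil (content : List String) (hne : content ≠ [])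
    (hex : ∃ c ∈ List.range ((content.headD "").toList.length), pvColOK content c) :
    pvPos content ≠ [] := by
  obtain ⟨c, -, hc1, hlt, hexl, hall⟩ := hex
  obtain ⟨hm0, -, l0, hl0mem, hl0len⟩ := pv_M_facts content hne
  have hcm : (c : Int) < pvM content := by
    have := hlt l0 hl0mem
    omega
  have hmem : c - 1 ∈ List.range ((pvM content - 1).toNat) := by
    rw [List.mem_range]
    omega
  have hgood : pvGood content ((c - 1) + 1) = true := by
    have hc : (c - 1) + 1 = c := Nat.sub_add_cancel hc1
    rw [hc]
    simp only [pvGood, pvNs, Bool.and_eq_true, List.any_eq_true, Bool.not_eq_eq_eq_not,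
      Bool.not_true, List.any_eq_false]
    constructor
    · obtain ⟨l, hlm, hlv⟩ := hexl
      exact ⟨l, hlm, by simpa using hlv⟩
    · intro l hlm
      have h2 := hall l hlm
      intro hv
      exact h2 ⟨by simpa using hv.1, by simpa using hv.2⟩
  apply List.ne_nil_of_mem (a := ((c - 1 : Nat) : Int) + 1)
  unfold pvPos
  exact List.mem_map_of_mem (List.mem_filter.mpr ⟨hmem, hgood⟩)

theorem pv_main (content : List String) (hpre : Pre_auto_column_splitter content) :
    auto_column_splitter content = auto_column_splitter_alt content := by
  obtain ⟨hne, hex⟩ := hpre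
  rw [pv_A_canon, pv_B_canon content hne (pv_pos_ne_nil content hne hex)]


-- ===== VERDICT =====
theorem auto_column_splitter_spec : Claim_equal_auto_column_splitter := by
  intro content _ hpre
  unfold Spec_auto_column_splitter
  exact pv_main content hpre
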